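-- pv_equiv track=rewrite | github.com/thejayhaykid/Python | COS120/MPS/MP14/MP14.py | gameIsOver
-- ===== SOURCE A (Python) =====
-- def gameIsOver(CB):
--     redCount=0
--     grayCount=0
--     for row in CB:
--         for token in row:
--             if token in [1,2]:
--                 redCount+=1
--             elif token in [3,4]:
--                 grayCount+=1
--     if redCount==0:
--         return True
--     if grayCount==0:
--         return True
--     return False
-- ===== SOURCE B (Python) =====
-- def gameIsOver(CB):
--     hasRed = any(token in (1, 2) for row in CB for token in row)
--     hasGray = any(token in (3, 4) for row in CB for token in row)
--     return not (hasRed and hasGray)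
-- ===== Notes on version B (the rewrite author's own statement) =====
-- stated objective: simpler
-- what changed: Replaces the counting double-loop with two short-circuiting existence scans (any) over the board and returns not(hasRed and hasGray) instead of testing two counters against zero.
import Mathlib
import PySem

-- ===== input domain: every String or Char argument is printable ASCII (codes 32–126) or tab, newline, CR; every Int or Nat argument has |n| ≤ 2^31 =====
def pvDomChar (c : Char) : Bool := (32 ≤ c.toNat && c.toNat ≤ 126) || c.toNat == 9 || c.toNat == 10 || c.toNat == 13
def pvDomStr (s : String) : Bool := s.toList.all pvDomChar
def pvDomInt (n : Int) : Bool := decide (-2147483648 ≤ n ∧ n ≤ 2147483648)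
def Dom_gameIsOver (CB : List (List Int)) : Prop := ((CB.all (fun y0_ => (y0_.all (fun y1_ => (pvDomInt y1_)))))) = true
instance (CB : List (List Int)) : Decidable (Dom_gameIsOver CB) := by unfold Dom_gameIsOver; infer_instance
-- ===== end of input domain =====

-- B replaces the counting double-loop by two short-circuiting existence scans; objective: simpler.

-- ===== PORT A =====
-- counters redCount, grayCount threaded as a pair through the nested loops
def gameIsOver (CB : List (List Int)) : Bool :=
  let p := CB.foldl (fun acc row =>
    row.foldl (fun a token =>
      if token = 1 ∨ token = 2 then (a.1 + 1, a.2)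
      else if token = 3 ∨ token = 4 then (a.1, a.2 + 1)
      else a) acc) ((0 : Int), (0 : Int))
  if p.1 = 0 then true
  else if p.2 = 0 then true
  else false

-- ===== PORT B =====
def gameIsOver_alt (CB : List (List Int)) : Bool :=
  let hasRed := CB.any (fun row => row.any (fun token => token == 1 || token == 2))
  let hasGray := CB.any (fun row => row.any (fun token => token == 3 || token == 4))
  !(hasRed && hasGray)

-- ===== PRECONDITION & SPEC =====
def Spec_gameIsOver (CB : List (List Int)) (out : Bool) : Prop := out = gameIsOver_alt CB
instance (CB : List (List Int)) (out : Bool) : Decidable (Spec_gameIsOver CB out) := by unfold Spec_gameIsOver; infer_instance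

-- ===== CLAIM (what is proved, stated in full; the proofs are below) =====
def Claim_equal_gameIsOver : Prop := ∀ (CB : List (List Int)), Dom_gameIsOver CB → Spec_gameIsOver CB (gameIsOver CB)

-- ===== LEMMAS AND PROOFS =====

def pvStep (a : Int × Int) (token : Int) : Int × Int :=
  if token = 1 ∨ token = 2 then (a.1 + 1, a.2)
  else if token = 3 ∨ token = 4 then (a.1, a.2 + 1)
  else a

lemma pvRow_fold (row : List Int) (acc : Int × Int) :
    row.foldl pvStep acc =
      (acc.1 + (row.countP (fun t => t == 1 || t == 2) : Int),
       acc.2 + (row.countP (fun t => t == 3 || t == 4) : Int)) := by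
  induction row generalizing acc with
  | nil => simp
  | cons t ts ih =>
    rw [List.foldl_cons, ih]
    simp only [List.countP_cons, pvStep]
    by_cases h1 : t = 1 ∨ t = 2
    · have hb1 : (t == 1 || t == 2) = true := by rcases h1 with h | h <;> simp [h]
      have hb2 : (t == 3 || t == 4) = false := by rcases h1 with h | h <;> simp [h]
      simp only [h1, if_pos, hb1, hb2]
      refine Prod.ext ?_ ?_ <;> simp <;> ring
    · by_cases h3 : t = 3 ∨ t = 4
      · have hb1 : (t == 1 || t == 2) = false := by
          simp only [Bool.or_eq_false_iff, beq_eq_false_iff_ne]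
          exact ⟨fun h => h1 (Or.inl h), fun h => h1 (Or.inr h)⟩
        have hb2 : (t == 3 || t == 4) = true := by rcases h3 with h | h <;> simp [h]
        simp only [h1, h3, if_false, if_true, hb1, hb2]
        refine Prod.ext ?_ ?_ <;> simp <;> ring
      · have hb1 : (t == 1 || t == 2) = false := by
          simp only [Bool.or_eq_false_iff, beq_eq_false_iff_ne]
          exact ⟨fun h => h1 (Or.inl h), fun h => h1 (Or.inr h)⟩
        have hb2 : (t == 3 || t == 4) = false := by
          simp only [Bool.or_eq_false_iff, beq_eq_false_iff_ne]
          exact ⟨fun h => h3 (Or.inl h), fun h => h3 (Or.inr h)⟩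
        simp [h1, h3, hb1, hb2]

lemma pvBoard_fold (CB : List (List Int)) (acc : Int × Int) :
    CB.foldl (fun acc row => row.foldl pvStep acc) acc =
      (acc.1 + (((CB.map (fun row => row.countP (fun t => t == 1 || t == 2))).sum : Nat) : Int),
       acc.2 + (((CB.map (fun row => row.countP (fun t => t == 3 || t == 4))).sum : Nat) : Int)) := by
  induction CB generalizing acc with
  | nil => simp
  | cons r rs ih =>
    rw [List.foldl_cons, pvRow_fold, ih]
    simp only [List.map_cons, List.sum_cons]
    refine Prod.ext ?_ ?_ <;> simp <;> ring

lemma pvCount_zero_iff (CB : List (List Int)) (p : Int → Bool) :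
    ((CB.map (fun row => row.countP p)).sum = 0) ↔
      CB.any (fun row => row.any p) = false := by
  simp [List.sum_eq_zero_iff, List.countP_eq_zero, List.any_eq_false]

-- ===== VERDICT (by name: the statement is the Claim_ definition above) =====
theorem gameIsOver_spec : Claim_equal_gameIsOver := by
  intro CB _
  unfold Spec_gameIsOver gameIsOver gameIsOver_alt
  have hb := pvBoard_fold CB (0, 0)
  simp only [show (fun (a : Int × Int) (token : Int) =>
      if token = 1 ∨ token = 2 then (a.1 + 1, a.2)
      else if token = 3 ∨ token = 4 then (a.1, a.2 + 1)
      else a) = pvStep from rfl]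
  rw [hb]
  simp only [zero_add, Nat.cast_eq_zero]
  simp only [pvCount_zero_iff]
  cases hR : CB.any (fun row => row.any (fun t => t == 1 || t == 2)) <;>
    cases hG : CB.any (fun row => row.any (fun t => t == 3 || t == 4)) <;> simp
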